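-- pv_equiv track=rewrite | github.com/AronKa-SAG/apiGatewayExamples | run_docker_gw.py | nameOf
-- ===== SOURCE A (Python) =====
-- def nameOf(file : str) -> str:
--     name : str = ""
--     partOfName : bool = False
--     for c in file:
--         if c == ".":
--             partOfName = False
--         if partOfName:
--             name += c
--         if c == "-":
--             partOfName = True
--     return name
-- ===== SOURCE B (Python) =====
-- def nameOf(file : str) -> str:
--     parts = []
--     for seg in file.split('.'):
--         i = seg.find('-')
--         if i != -1:
--             parts.append(seg[i+1:])
--     return ''.join(parts)
-- ===== Notes on version B (the rewrite author's own statement) =====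
-- stated objective: simpler
-- what changed: Replaces A's per-character boolean state machine (with quadratic str += accumulation) by a split-on-dot pass that, per segment, appends everything after the first dash (str.find + slice) and joins the pieces once.
import Mathlib
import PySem

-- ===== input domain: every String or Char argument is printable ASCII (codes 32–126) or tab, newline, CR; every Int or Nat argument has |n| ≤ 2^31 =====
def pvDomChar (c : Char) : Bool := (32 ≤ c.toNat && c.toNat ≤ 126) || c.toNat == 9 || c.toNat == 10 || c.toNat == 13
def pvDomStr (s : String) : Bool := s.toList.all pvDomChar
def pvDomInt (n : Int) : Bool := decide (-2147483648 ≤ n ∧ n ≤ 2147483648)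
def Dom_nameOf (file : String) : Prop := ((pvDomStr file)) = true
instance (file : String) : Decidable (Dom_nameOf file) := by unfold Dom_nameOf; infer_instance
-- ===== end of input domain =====

-- B replaces A's per-character on/off state machine by split('.') + per-segment take-after-first-dash; objective: simpler.

-- ===== PORT A =====
-- one iteration of A's for-loop: state is (name so far, partOfName)
def nameOfStep (st : List Char × Bool) (c : Char) : List Char × Bool :=
  let part1 := if c = '.' then false else st.2
  let name := if part1 then st.1 ++ [c] else st.1
  let part2 := if c = '-' then true else part1
  (name, part2)

def nameOf (file : String) : String :=
  String.ofList (file.toList.foldl nameOfStep ([], false)).1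

-- ===== PORT B =====
def nameOf_alt (file : String) : String :=
  let segs := (PySem.Str.split? file ".").getD []
  let parts := segs.foldl (fun acc seg =>
    let i := PySem.Str.find seg "-"
    if i != -1 then acc ++ [PySem.Str.slice seg (some (i + 1)) none] else acc) []
  PySem.Str.join "" parts

-- ===== PRECONDITION & SPEC =====
def Spec_nameOf (file : String) (out : String) : Prop := out = nameOf_alt file
instance (file : String) (out : String) : Decidable (Spec_nameOf file out) := by unfold Spec_nameOf; infer_instance

-- ===== CLAIM (what is proved, stated in full; the proofs are below) =====
def Claim_equal_nameOf : Prop := ∀ (file : String), Dom_nameOf file → Spec_nameOf file (nameOf file)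

-- ===== LEMMAS AND PROOFS =====

-- split on '.' as a structural recursion
def splitDot : List Char → List (List Char)
  | [] => [[]]
  | c :: cs => if c = '.' then [] :: splitDot cs else (c :: (splitDot cs).headI) :: (splitDot cs).tail

-- what B contributes for one segment
def extractSeg (seg : List Char) : List Char :=
  if '-' ∈ seg then (seg.dropWhile (fun c => c != '-')).drop 1 else []

def extractAll (segs : List (List Char)) : List Char := (segs.map extractSeg).flatten

theorem splitDot_eq_cons (cs : List Char) : splitDot cs = (splitDot cs).headI :: (splitDot cs).tail := by
  cases cs with
  | nil => simp [splitDot]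
  | cons c cs => simp only [splitDot]; split_ifs <;> simp

theorem chars_join_nil_eq_flatten (l : List (List Char)) : PySem.Chars.join [] l = l.flatten := by
  induction l with
  | nil => simp [PySem.Chars.join_nil]
  | cons a t ih =>
    cases t with
    | nil => simpa using PySem.Chars.join_singleton [] a
    | cons b u => rw [PySem.Chars.join_cons_cons]; simp_all

theorem splitOn_go_dot : ∀ (fuel : Nat) (l cur : List Char) (acc : List (List Char)),
    l.length ≤ fuel →
    PySem.Chars.splitOn.go ['.'] fuel l cur acc
      = acc.reverse ++ (cur.reverse ++ (splitDot l).headI) :: (splitDot l).tail := by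
  intro fuel
  induction fuel with
  | zero =>
    intro l cur acc hl
    have : l = [] := by simpa using List.eq_nil_of_length_eq_zero (by omega)
    subst this
    rw [PySem.Chars.splitOn.go]
    simp [splitDot]
  | succ fuel ih =>
    intro l cur acc hl
    cases l with
    | nil => rw [PySem.Chars.splitOn.go] <;> simp [splitDot]
    | cons c rest =>
      rw [PySem.Chars.splitOn.go]
      by_cases hc : c = '.'
      · subst hc
        have hpre : ['.'].isPrefixOf ('.' :: rest) = true := by
          rw [List.isPrefixOf_iff_prefix]
          exact ⟨rest, rfl⟩
        rw [if_pos hpre]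
        have := ih rest [] (cur.reverse :: acc) (by simpa using Nat.lt_succ_iff.mp (by simpa using hl))
        simp only [List.length_cons, List.length_nil, List.drop_succ_cons, List.drop_zero]
          at this ⊢
        rw [this]
        have hsd := splitDot_eq_cons rest
        rw [show splitDot ('.' :: rest) = [] :: splitDot rest from by simp [splitDot],
          List.headI_cons, List.tail_cons, hsd]
        simp
      · have hpre : ['.'].isPrefixOf (c :: rest) = false := by
          rw [Bool.eq_false_iff, Ne, List.isPrefixOf_iff_prefix]
          intro h
          rcases List.cons_prefix_cons.mp h with ⟨h1, -⟩
          exact hc h1.symm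
        rw [if_neg (by simp [hpre])]
        rw [ih rest (c :: cur) acc (by simpa using Nat.lt_succ_iff.mp (by simpa using hl))]
        simp [splitDot, hc]

theorem splitOn_dot (cs : List Char) : PySem.Chars.splitOn cs ['.'] = splitDot cs := by
  unfold PySem.Chars.splitOn
  rw [splitOn_go_dot (cs.length + 1) cs [] [] (by omega)]
  simpa using (splitDot_eq_cons cs).symm

theorem takeWhile_length_eq {p : Char → Bool} :
    ∀ (l : List Char) (k : Nat) (hk : k < l.length),
      (∀ i (hi : i < k), p (l[i]'(by omega)) = true) → p (l[k]) = false →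
      (l.takeWhile p).length = k := by
  intro l
  induction l with
  | nil => intro k hk; simp at hk
  | cons c t ih =>
    intro k hk hfore hk0
    cases k with
    | zero => simp at hk0; simp [List.takeWhile_cons, hk0]
    | succ k =>
      have hc : p c = true := hfore 0 (by omega)
      simp only [List.takeWhile_cons, hc, if_true, List.length_cons]
      have := ih k (by simpa using hk) (fun i hi => by simpa using hfore (i + 1) (by omega))
        (by simpa using hk0)
      omega

theorem findDash (s : List Char) :
    PySem.Chars.find s ['-'] =
      if '-' ∈ s then ((s.takeWhile (fun c => c != '-')).length : Int) else -1 := by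
  by_cases hm : '-' ∈ s
  · have hinf : ['-'] <:+: s := (List.singleton_infix_iff '-' s).mpr hm
    have h0 : 0 ≤ PySem.Chars.find s ['-'] := (PySem.Chars.find_nonneg_iff s ['-']).mpr hinf
    obtain ⟨hpre, hmin⟩ := PySem.Chars.find_spec h0
    set k := (PySem.Chars.find s ['-']).toNat with hkdef
    have hklt : k < s.length := by
      by_contra h
      push_neg at h
      rw [List.drop_eq_nil_of_le h] at hpre
      simp at hpre
    have hsk : s[k] = '-' := by
      obtain ⟨t, ht⟩ := hpre
      have h1 : (s.drop k)[0]? = some '-' := by rw [← ht]; rfl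
      have h2 : (s.drop k)[0]? = s[k]? := by simp [List.getElem?_drop]
      rw [h2] at h1
      exact (List.getElem?_eq_some_iff.mp h1).choose_spec
    have hfore : ∀ i (hi : i < k), s[i]'(by omega) ≠ '-' := by
      intro i hi hcon
      apply hmin i hi
      rw [List.drop_eq_getElem_cons (by omega)]
      exact ⟨s.drop (i + 1), by rw [hcon]; rfl⟩
    have hlen : (s.takeWhile (fun c => c != '-')).length = k := by
      apply takeWhile_length_eq s k hklt
      · intro i hi; simpa using hfore i hi
      · simp [hsk]
    rw [if_pos hm, hlen]
    omega
  · rw [if_neg hm]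
    exact (PySem.Chars.find_eq_neg_one_iff s ['-']).mpr
      (fun h => hm ((List.singleton_infix_iff '-' s).mp h))

theorem drop_after_dash (seg : List Char) :
    seg.drop ((seg.takeWhile (fun c => c != '-')).length + 1)
      = (seg.dropWhile (fun c => c != '-')).drop 1 := by
  conv_lhs => rw [← List.takeWhile_append_dropWhile (p := fun c => c != '-') (l := seg)]
  rw [List.drop_append]
  simp [List.drop_eq_nil_of_le]

-- A's loop, the emitted characters only
def emitBody : List Char → Bool → List Char
  | [], _ => []
  | c :: cs, p =>
    (if (if c = '.' then false else p) then [c] else [])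
      ++ emitBody cs (if c = '-' then true else if c = '.' then false else p)

theorem foldA : ∀ (cs : List Char) (acc : List Char) (p : Bool),
    (cs.foldl nameOfStep (acc, p)).1 = acc ++ emitBody cs p := by
  intro cs
  induction cs with
  | nil => intro acc p; simp [emitBody]
  | cons c cs ih =>
    intro acc p
    simp only [List.foldl_cons]
    rw [show nameOfStep (acc, p) c
        = ((if (if c = '.' then false else p) then acc ++ [c] else acc),
           if c = '-' then true else if c = '.' then false else p) from rfl]
    rw [ih]
    simp only [emitBody]
    split_ifs <;> simp

theorem emitBody_splitDot : ∀ cs : List Char,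
    emitBody cs true = (splitDot cs).headI ++ extractAll (splitDot cs).tail
    ∧ emitBody cs false = extractAll (splitDot cs) := by
  intro cs
  induction cs with
  | nil => simp [emitBody, splitDot, extractAll, extractSeg]
  | cons c cs ih =>
    obtain ⟨ih1, ih2⟩ := ih
    by_cases hdot : c = '.'
    · subst hdot
      have hne : ('.' : Char) ≠ '-' := by decide
      constructor
      · simp [emitBody, splitDot, hne, ih2]
      · simp [emitBody, splitDot, hne, ih2, extractAll, extractSeg]
    · by_cases hdash : c = '-'
      · subst hdash
        have hne : ¬(('-' : Char) = '.') := by decide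
        have h1 : extractSeg ('-' :: (splitDot cs).headI) = (splitDot cs).headI := by
          simp [extractSeg]
        constructor
        · simp [emitBody, splitDot, hne, ih1, extractAll]
        · have e1 : emitBody ('-' :: cs) false = emitBody cs true := by simp [emitBody]
          rw [e1, ih1]
          simp only [splitDot, if_neg hne]
          simp only [extractAll, List.map_cons, List.flatten_cons, h1]
      · have hrw : extractAll (splitDot cs)
            = extractSeg (splitDot cs).headI ++ extractAll (splitDot cs).tail := by
          conv_lhs => rw [splitDot_eq_cons cs]
          simp [extractAll]
        have hseg : extractSeg (c :: (splitDot cs).headI) = extractSeg (splitDot cs).headI := by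
          unfold extractSeg
          rw [List.dropWhile_cons]
          have hb : (c != '-') = true := by simpa using hdash
          rw [hb]
          simp only [if_true]
          by_cases hmem : '-' ∈ (splitDot cs).headI
          · rw [if_pos (List.mem_cons_of_mem _ hmem), if_pos hmem]
          · rw [if_neg (by simp [hmem, Ne.symm hdash]), if_neg hmem]
        constructor
        · simp [emitBody, splitDot, hdot, hdash, ih1]
        · simp [emitBody, splitDot, hdot, hdash]
          rw [ih2, hrw]
          simp only [extractAll, List.map_cons, List.flatten_cons, hseg, List.map, List.tail]

theorem flatten_filter (L : List String) :
    ((List.filter (fun seg => PySem.Str.find seg "-" != -1) L).map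
       (fun seg => (PySem.Str.slice seg (some (PySem.Str.find seg "-" + 1)) none).toList)).flatten
      = ((L.map String.toList).map extractSeg).flatten := by
  induction L with
  | nil => simp
  | cons a t ih =>
    have hfind : PySem.Str.find a "-" = PySem.Chars.find a.toList ['-'] := rfl
    by_cases hm : '-' ∈ a.toList
    · have hval : PySem.Chars.find a.toList ['-'] = ((a.toList.takeWhile (fun c => c != '-')).length : Int) := by
        rw [findDash]; simp [hm]
      have hp : (PySem.Str.find a "-" != -1) = true := by
        rw [hfind, hval]; simp
      have hsl : (PySem.Str.slice a (some (PySem.Str.find a "-" + 1)) none).toList = extractSeg a.toList := by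
        show (String.ofList (PySem.Chars.slice a.toList (some (PySem.Str.find a "-" + 1)) none)).toList = _
        rw [String.toList_ofList, PySem.Chars.slice_eq_listSlice,
            PySem.List.slice_from _ (by rw [hfind, hval]; omega)]
        rw [hfind, hval]
        have : (((a.toList.takeWhile (fun c => c != '-')).length : Int) + 1).toNat
            = (a.toList.takeWhile (fun c => c != '-')).length + 1 := by omega
        rw [this, drop_after_dash]
        simp [extractSeg, hm]
      simp only [List.filter_cons, hp, if_true, List.map_cons, List.flatten_cons, hsl, ih]
    · have hp : (PySem.Str.find a "-" != -1) = false := by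
        rw [hfind, findDash]; simp [hm]
      have hseg : extractSeg a.toList = [] := by simp [extractSeg, hm]
      simp only [List.filter_cons, hp, Bool.false_eq_true, if_false, List.map_cons,
        List.flatten_cons, hseg, List.nil_append]
      exact ih

theorem toList_dot : (".".toList : List Char) = ['.'] := rfl

-- ===== VERDICT (by name: the statement is the Claim_ definition above) =====
theorem nameOf_spec : Claim_equal_nameOf := by
  intro file _
  unfold Spec_nameOf nameOf nameOf_alt
  -- A side
  rw [foldA file.toList [] false, (emitBody_splitDot file.toList).2]
  -- B side: the split
  have hsplit : PySem.Str.split? file "." = some ((splitDot file.toList).map String.ofList) := by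
    show Option.map (fun x => List.map String.ofList x) (PySem.Chars.split? file.toList ".".toList) = _
    rw [toList_dot]
    unfold PySem.Chars.split?
    simp [splitOn_dot]
  rw [hsplit]
  simp only [Option.getD_some, List.nil_append]
  -- the loop is a filter+map
  rw [show (fun (acc : List String) (seg : String) =>
        let i := PySem.Str.find seg "-"
        if i != -1 then acc ++ [PySem.Str.slice seg (some (i + 1)) none] else acc)
      = (fun acc seg =>
        if (fun seg => PySem.Str.find seg "-" != -1) seg then
          acc ++ [(fun seg => PySem.Str.slice seg (some (PySem.Str.find seg "-" + 1)) none) seg]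
        else acc) from rfl]
  rw [PySem.List.foldl_append_if]
  -- join with "" is flatten
  have hjoin : ∀ parts : List String,
      PySem.Str.join "" parts = String.ofList ((parts.map String.toList).flatten) := by
    intro parts
    show String.ofList (PySem.Chars.join "".toList (parts.map String.toList)) = _
    rw [show ("".toList : List Char) = [] from rfl, chars_join_nil_eq_flatten]
  rw [hjoin]
  congr 1
  rw [List.nil_append, List.map_map]
  simp only [Function.comp_def]
  rw [flatten_filter]
  simp [extractAll, List.map_map, Function.comp_def, String.toList_ofList]
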